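-- pv_equiv track=rewrite | github.com/boshika/cs | interviewchallenges/aggregate_sum_keys.py | distr_of_rec_digit_sums
-- ===== SOURCE A (Python) =====
-- def reg_dig_sum(n):
--     convert_to_int = [int(i) for i in str(n)]
--     total = sum(convert_to_int)
--     if total < 10:
--         return total
--     else:
--         return reg_dig_sum(total)
--
-- def distr_of_rec_digit_sums(low=0, high=1500):
--     sum_dict = {}
--     for x in range(low, high + 1):
--         if reg_dig_sum(x) not in sum_dict:
--             sum_dict[reg_dig_sum(x)] = 1
--         else:
--             sum_dict[reg_dig_sum(x)] += 1
--     return sum_dict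
-- ===== SOURCE B (Python) =====
-- def distr_of_rec_digit_sums(low=0, high=1500):
--     # Closed form: the digital root of x>=1 is 1 + (x-1) % 9 (and 0 for x=0);
--     # keys appear in first-occurrence order, counts are counted arithmetically.
--     if low > high:
--         return {}
--     res = {}
--     start = low
--     if low == 0:
--         res[0] = 1
--         start = 1
--     for k in range(9):
--         first = start + k
--         if first > high:
--             break
--         res[1 + (first - 1) % 9] = (high - first) // 9 + 1
--     return res
-- ===== Notes on version B (the rewrite author's own statement) =====
-- stated objective: faster
-- what changed: Replaces the per-number recursive string digit-sum loop over the whole range by the digital-root closed form (dr(x)=1+(x-1)%9, 0 for x=0): at most 10 dictionary entries are computed directly, each count by an arithmetic formula, in the same first-occurrence key order.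
import Mathlib
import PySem

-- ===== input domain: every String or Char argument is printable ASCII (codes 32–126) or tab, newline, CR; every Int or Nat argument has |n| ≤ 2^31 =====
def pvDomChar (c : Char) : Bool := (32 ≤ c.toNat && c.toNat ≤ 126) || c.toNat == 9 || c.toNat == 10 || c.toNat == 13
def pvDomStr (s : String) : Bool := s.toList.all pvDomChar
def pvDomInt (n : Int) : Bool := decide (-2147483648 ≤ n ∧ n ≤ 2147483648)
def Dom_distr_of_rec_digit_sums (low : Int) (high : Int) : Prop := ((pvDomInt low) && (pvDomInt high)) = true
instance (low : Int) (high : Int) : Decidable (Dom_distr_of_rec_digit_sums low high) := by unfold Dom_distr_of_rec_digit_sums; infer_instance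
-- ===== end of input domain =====

-- B replaces the per-number recursive string digit-sum loop by the digital-root
-- closed form (0 for 0, 1+(x-1)%9 otherwise) and computes each of the at most 10
-- dictionary entries (same first-occurrence key order) by an arithmetic count formula.

-- ===== PORT A =====

-- reg_dig_sum, with fuel (the digit sum of n ≥ 10 is < n, so n.toNat + 1 steps always suffice);
-- int(i) on a one-character string is PySem.Int.ofChars? [c]; the .getD 0 default is only
-- reached when parsing fails, i.e. on negative n, where Python A raises (excluded by Pre_).
def reg_dig_sum_go : Nat → Int → Int
  | 0, _ => 0
  | fuel+1, n =>
    let convert_to_int := (PySem.Int.toChars n).map (fun c => (PySem.Int.ofChars? [c]).getD 0)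
    let total := convert_to_int.sum
    if total < 10 then total else reg_dig_sum_go fuel total

def reg_dig_sum (n : Int) : Int := reg_dig_sum_go (n.toNat + 1) n

def distr_of_rec_digit_sums (low : Int) (high : Int) : List (Int × Int) :=
  let sum_dict : PySem.Dict Int Int := PySem.Dict.empty
  ((PySem.List.pyRange low (high + 1)).foldl
    (fun sum_dict x =>
      if (sum_dict.contains (reg_dig_sum x)) = false then
        sum_dict.insert (reg_dig_sum x) 1
      else
        -- sum_dict[reg_dig_sum(x)] += 1 (the key is present in this branch)
        sum_dict.insert (reg_dig_sum x) (sum_dict.getD (reg_dig_sum x) 0 + 1))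
    sum_dict).items

-- ===== PORT B =====

-- the `for k in range(9): … if first > high: break …` loop of Source B
def pvAltLoop (high : Int) (start : Int) : List Int → PySem.Dict Int Int → PySem.Dict Int Int
  | [], res => res
  | k :: rest, res =>
    if high < start + k then res  -- break
    else pvAltLoop high start rest
      (res.insert (1 + PySem.Int.mod (start + k - 1) 9)
                  (PySem.Int.floordiv (high - (start + k)) 9 + 1))

def distr_of_rec_digit_sums_alt (low : Int) (high : Int) : List (Int × Int) :=
  if low > high then []
  else
    let start := if low = 0 then 1 else low
    let res : PySem.Dict Int Int := if low = 0 then PySem.Dict.empty.insert 0 1 else PySem.Dict.empty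
    (pvAltLoop high start (PySem.List.pyRange 0 9) res).items

-- ===== PRECONDITION & SPEC =====
-- Pre_ excludes exactly the inputs where the range contains a negative number: there
-- str(x) starts with '-' and int('-') raises ValueError inside reg_dig_sum, so A raises.
def Pre_distr_of_rec_digit_sums (low : Int) (high : Int) : Prop := 0 ≤ low ∨ high < low
instance (low : Int) (high : Int) : Decidable (Pre_distr_of_rec_digit_sums low high) := by unfold Pre_distr_of_rec_digit_sums; infer_instance
def pvWitness_distr_of_rec_digit_sums : Int × Int := (0, 20)

def Spec_distr_of_rec_digit_sums (low : Int) (high : Int) (out : List (Int × Int)) : Prop := out = distr_of_rec_digit_sums_alt low high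
instance (low : Int) (high : Int) (out : List (Int × Int)) : Decidable (Spec_distr_of_rec_digit_sums low high out) := by unfold Spec_distr_of_rec_digit_sums; infer_instance

-- ===== CLAIM (what is proved, stated in full; the proofs are below) =====
def Claim_equal_distr_of_rec_digit_sums : Prop := ∀ (low : Int) (high : Int), Dom_distr_of_rec_digit_sums low high → Pre_distr_of_rec_digit_sums low high → Spec_distr_of_rec_digit_sums low high (distr_of_rec_digit_sums low high)

-- ===== LEMMAS AND PROOFS =====

-- the digital root: the value reg_dig_sum computes on nonnegative input
def pvDr (x : Int) : Int := if x = 0 then 0 else 1 + PySem.Int.mod (x - 1) 9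

-- int(str-of-one-digit-char) is the digit
lemma pv_chval_digitChar (d : Nat) (hd : d < 10) :
    (PySem.Int.ofChars? [Nat.digitChar d]).getD 0 = (d : Int) := by
  interval_cases d <;> decide

-- sum of the parsed characters produced by Nat.toDigitsCore
lemma pv_toDigitsCore_sum (f : Nat) :
    ∀ (n : Nat) (acc : List Char), n < f →
      ((Nat.toDigitsCore 10 f n acc).map (fun c => (PySem.Int.ofChars? [c]).getD 0)).sum
        = ((Nat.digits 10 n).sum : Int)
          + ((acc.map (fun c => (PySem.Int.ofChars? [c]).getD 0)).sum) := by
  induction f with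
  | zero => intro n acc h; omega
  | succ f ih =>
    intro n acc h
    rw [Nat.toDigitsCore]
    by_cases h0 : n / 10 = 0
    · simp only [h0, if_true]
      have hn10 : n < 10 := by omega
      rcases Nat.eq_zero_or_pos n with rfl | hpos
      · simp [pv_chval_digitChar 0 (by norm_num)]
      · rw [Nat.digits_def' (by norm_num : 1 < 10) hpos, Nat.div_eq_of_lt hn10]
        rw [Nat.mod_eq_of_lt hn10]
        simp [pv_chval_digitChar n hn10]
    · simp only [h0, if_false]
      have hpos : 0 < n := by omega
      have hlt : n / 10 < f := by omega
      rw [ih (n / 10) _ hlt, Nat.digits_def' (by norm_num : 1 < 10) hpos]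
      simp [pv_chval_digitChar (n % 10) (Nat.mod_lt _ (by norm_num))]
      ring

lemma pv_digits_sum_eq_zero (n : Nat) (h : (Nat.digits 10 n).sum = 0) : n = 0 := by
  by_contra hne
  have hpos : 0 < n := Nat.pos_of_ne_zero hne
  rw [Nat.digits_def' (by norm_num : 1 < 10) hpos] at h
  simp at h
  have := pv_digits_sum_eq_zero (n / 10) h.2
  omega

lemma pv_digits_sum_lt (n : Nat) (h : 10 ≤ n) : (Nat.digits 10 n).sum < n := by
  rw [Nat.digits_def' (by norm_num : 1 < 10) (by omega)]
  have := Nat.digit_sum_le 10 (n / 10)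
  simp only [List.sum_cons]
  omega

-- the `total` computed by one reg_dig_sum step, for nonnegative n
lemma pv_total_eq (n : Int) (hn : 0 ≤ n) :
    ((PySem.Int.toChars n).map (fun c => (PySem.Int.ofChars? [c]).getD 0)).sum
      = ((Nat.digits 10 n.toNat).sum : Int) := by
  rw [PySem.Int.toChars, if_neg (by omega), Nat.toDigits]
  rw [pv_toDigitsCore_sum (n.toNat + 1) n.toNat [] (Nat.lt_succ_self _)]
  simp

lemma pv_reg_dig_sum_go_eq (fuel : Nat) :
    ∀ (n : Int), 0 ≤ n → n.toNat < fuel → reg_dig_sum_go fuel n = pvDr n := by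
  induction fuel with
  | zero => intro n _ h; omega
  | succ fuel ih =>
    intro n hn hf
    rw [reg_dig_sum_go]
    simp only [pv_total_eq n hn]
    set S : Nat := (Nat.digits 10 n.toNat).sum with hS
    have hmod : n.toNat % 9 = S % 9 := Nat.modEq_nine_digits_sum n.toNat
    by_cases hlt : (S : Int) < 10
    · rw [if_pos hlt]
      by_cases h0 : n = 0
      · subst h0; simp [pvDr, hS]
      · have hSne : S ≠ 0 := fun h => h0 (by have := pv_digits_sum_eq_zero n.toNat (hS ▸ h); omega)
        rw [pvDr, if_neg h0, PySem.Int.mod_eq_emod_of_pos (by norm_num)]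
        omega
    · rw [if_neg hlt]
      have hle : S ≤ n.toNat := Nat.digit_sum_le 10 n.toNat
      have h10 : 10 ≤ n.toNat := by omega
      have hSlt : S < n.toNat := pv_digits_sum_lt n.toNat h10
      rw [ih (S : Int) (by positivity) (by omega)]
      rw [pvDr, pvDr, if_neg (by omega : (S:Int) ≠ 0), if_neg (by omega : n ≠ 0),
          PySem.Int.mod_eq_emod_of_pos (by norm_num), PySem.Int.mod_eq_emod_of_pos (by norm_num)]
      omega

lemma pv_reg_dig_sum_eq (n : Int) (hn : 0 ≤ n) : reg_dig_sum n = pvDr n :=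
  pv_reg_dig_sum_go_eq (n.toNat + 1) n hn (Nat.lt_succ_self _)

lemma pv_dr_pos (x : Int) (hx : 1 ≤ x) : 1 ≤ pvDr x := by
  rw [pvDr, if_neg (by omega), PySem.Int.mod_eq_emod_of_pos (by norm_num)]
  have := Int.emod_nonneg (x - 1) (by norm_num : (9:Int) ≠ 0)
  omega

lemma pv_dr_eq_iff (x y : Int) (hx : 1 ≤ x) (hy : 1 ≤ y) :
    pvDr x = pvDr y ↔ (x - y) % 9 = 0 := by
  rw [pvDr, pvDr, if_neg (by omega), if_neg (by omega),
      PySem.Int.mod_eq_emod_of_pos (by norm_num), PySem.Int.mod_eq_emod_of_pos (by norm_num)]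
  omega

-- counts of a digital-root value over a range starting at s ≥ 1
lemma pv_count_dr (s r : Int) (hs : 1 ≤ s) (hr : 1 ≤ r) :
    ∀ (e : Int), s - 1 ≤ e →
      ((((PySem.List.pyRange s (e + 1)).map pvDr).count (pvDr r) : Int))
        = (if s + (r - s) % 9 ≤ e then (e - (s + (r - s) % 9)) / 9 + 1 else 0) := by
  intro e he
  induction e, he using Int.le_induction with
  | base =>
    rw [show s - 1 + 1 = s by ring, PySem.List.pyRange_one_eq_nil (le_refl s)]
    have := Int.emod_nonneg (r - s) (by norm_num : (9:Int) ≠ 0)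
    rw [if_neg (by omega : ¬ s + (r - s) % 9 ≤ s - 1)]
    simp
  | succ e he ih =>
    rw [show e + 1 + 1 = (e + 1) + 1 by ring,
        PySem.List.pyRange_one_succ_right (by omega : s ≤ e + 1),
        List.map_append, List.count_append, List.map_singleton, List.count_singleton]
    have hmem := Int.emod_nonneg (r - s) (by norm_num : (9:Int) ≠ 0)
    have hlt := Int.emod_lt_of_pos (r - s) (by norm_num : (0:Int) < 9)
    by_cases h9 : (e + 1 - r) % 9 = 0
    · have : pvDr (e + 1) = pvDr r := (pv_dr_eq_iff _ _ (by omega) hr).mpr h9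
      rw [this]
      simp only [beq_self_eq_true, if_true]
      push_cast
      rw [ih]
      omega
    · have : ¬ (pvDr (e + 1) = pvDr r) := fun h => h9 ((pv_dr_eq_iff _ _ (by omega) hr).mp h)
      rw [if_neg (by simpa using this)]
      push_cast
      rw [ih]
      omega

lemma pv_dr_mem_iff (s e : Int) (hs : 1 ≤ s) (he : s - 1 ≤ e) :
    pvDr (e + 1) ∈ (PySem.List.pyRange s (e + 1)).map pvDr ↔ 9 ≤ e + 1 - s := by
  constructor
  · intro h
    obtain ⟨x, hx, hdr⟩ := List.mem_map.mp h
    rw [PySem.List.mem_pyRange_one] at hx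
    have h9 := (pv_dr_eq_iff x (e + 1) (by omega) (by omega)).mp hdr
    omega
  · intro h
    refine List.mem_map.mpr ⟨e + 1 - 9, ?_, ?_⟩
    · rw [PySem.List.mem_pyRange_one]; omega
    · exact (pv_dr_eq_iff _ _ (by omega) (by omega)).mpr (by omega)

-- first-occurrence order of the digital-root values over a range starting at s ≥ 1
lemma pv_keys_dr (s : Int) (hs : 1 ≤ s) :
    ∀ (e : Int), s - 1 ≤ e →
      PySem.Set.ofList ((PySem.List.pyRange s (e + 1)).map pvDr)
        = (PySem.List.pyRange 0 (min (e + 1 - s) 9)).map (fun k => pvDr (s + k)) := by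
  intro e he
  induction e, he using Int.le_induction with
  | base =>
    rw [show s - 1 + 1 = s by ring, PySem.List.pyRange_one_eq_nil (le_refl s),
        PySem.List.pyRange_one_eq_nil (by omega : min (s - s) 9 ≤ 0)]
    rfl
  | succ e he ih =>
    rw [show e + 1 + 1 = (e + 1) + 1 by ring,
        PySem.List.pyRange_one_succ_right (by omega : s ≤ e + 1),
        List.map_append, List.map_singleton, PySem.Set.ofList_append,
        PySem.Set.update_cons, PySem.Set.update_nil]
    by_cases h9 : 9 ≤ e + 1 - s
    · rw [PySem.Set.add, if_pos]
      · rw [ih, show min (e + 1 + 1 - s) 9 = min (e + 1 - s) 9 by omega]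
      · exact List.elem_iff.mpr (PySem.Set.mem_ofList _ _ |>.mpr ((pv_dr_mem_iff s e hs he).mpr h9))
    · rw [PySem.Set.add, if_neg, ih]
      · rw [show min (e + 1 - s) 9 = e + 1 - s by omega,
            show min (e + 1 + 1 - s) 9 = (e + 1 - s) + 1 by omega,
            PySem.List.pyRange_one_succ_right (by omega : (0:Int) ≤ e + 1 - s),
            List.map_append, List.map_singleton,
            show s + (e + 1 - s) = e + 1 by ring]
      · intro hc
        exact h9 ((pv_dr_mem_iff s e hs he).mp (PySem.Set.mem_ofList _ _ |>.mp (List.elem_iff.mp hc)))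

-- A's loop is Counter(map reg_dig_sum range)
lemma pv_a_fold_eq_counter (l : List Int) :
    l.foldl
      (fun sum_dict x =>
        if (sum_dict.contains (reg_dig_sum x)) = false then
          sum_dict.insert (reg_dig_sum x) 1
        else
          sum_dict.insert (reg_dig_sum x) (sum_dict.getD (reg_dig_sum x) 0 + 1))
      PySem.Dict.empty
      = PySem.Dict.counter (l.map reg_dig_sum) := by
  rw [PySem.Dict.counter_eq_foldl, List.foldl_map]
  congr 1
  funext d x
  by_cases hc : d.contains (reg_dig_sum x) = false
  · rw [if_pos hc, PySem.Dict.modify, PySem.Dict.getD_of_not_contains _ _ hc]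
    norm_num
  · rw [if_neg hc, PySem.Dict.modify]

-- B's loop appends its fresh entries
lemma pv_alt_loop_items (high start : Int) :
    ∀ (n : Nat) (j : Int) (d : PySem.Dict Int Int), j + n = 9 → 0 ≤ j →
      (∀ k, j ≤ k → k < 9 → d.contains (1 + PySem.Int.mod (start + k - 1) 9) = false) →
      (pvAltLoop high start (PySem.List.pyRange j 9) d).items
        = d.items ++ (PySem.List.pyRange j (min 9 (high - start + 1))).map
            (fun k => (1 + PySem.Int.mod (start + k - 1) 9,
                       PySem.Int.floordiv (high - (start + k)) 9 + 1)) := by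
  intro n
  induction n with
  | zero =>
    intro j d hj _ _
    rw [show j = (9:Int) by omega, PySem.List.pyRange_one_eq_nil (le_refl 9),
        PySem.List.pyRange_one_eq_nil (by omega : min 9 (high - start + 1) ≤ 9)]
    simp [pvAltLoop]
  | succ n ih =>
    intro j d hj hj0 hfresh
    rw [PySem.List.pyRange_one_cons (by omega : j < 9), pvAltLoop]
    by_cases hbr : high < start + j
    · rw [if_pos hbr, PySem.List.pyRange_one_eq_nil (by omega : min 9 (high - start + 1) ≤ j)]
      simp
    · rw [if_neg hbr,
          ih (j + 1) _ (by omega) (by omega) (by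
            intro k hk hk9
            rw [PySem.Dict.contains_insert]
            have h1 : ¬ ((1 + PySem.Int.mod (start + k - 1) 9 : Int)
                = 1 + PySem.Int.mod (start + j - 1) 9) := by
              rw [PySem.Int.mod_eq_emod_of_pos (by norm_num),
                  PySem.Int.mod_eq_emod_of_pos (by norm_num)]
              omega
            rw [hfresh k (by omega) hk9, Bool.or_false]
            exact beq_eq_false_iff_ne.mpr h1),
          PySem.Dict.items_insert_of_not_contains _ _ (hfresh j (le_refl j) (by omega)),
          PySem.List.pyRange_one_cons (by omega : j < min 9 (high - start + 1))]
      simp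

lemma pv_ofList_cons_fresh (a : Int) (l : List Int) (h : ∀ y ∈ l, y ≠ a) :
    PySem.Set.ofList (a :: l) = a :: PySem.Set.ofList l := by
  rw [show a :: l = [a] ++ l from rfl, PySem.Set.ofList_append,
      PySem.Set.update_eq_append_filter,
      show PySem.Set.ofList [a] = [a] from rfl, List.singleton_append]
  congr 1
  rw [List.filter_eq_self]
  intro y hy
  rw [PySem.Set.contains]
  simp [h y ((PySem.Set.mem_ofList l y).mp hy)]

-- assembly of the part of both dicts built from the range above 0
lemma pv_main_pos (s high : Int) (hs : 1 ≤ s) (hhi : s - 1 ≤ high) :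
    (PySem.Set.ofList ((PySem.List.pyRange s (high + 1)).map pvDr)).map
        (fun v => (v, (((PySem.List.pyRange s (high + 1)).map pvDr).count v : Int)))
      = (PySem.List.pyRange 0 (min 9 (high - s + 1))).map
          (fun k => (1 + PySem.Int.mod (s + k - 1) 9,
                     PySem.Int.floordiv (high - (s + k)) 9 + 1)) := by
  rw [pv_keys_dr s hs high hhi,
      show min (high + 1 - s) 9 = min 9 (high - s + 1) by omega, List.map_map]
  apply List.map_congr_left
  intro k hk
  rw [PySem.List.mem_pyRange_one] at hk
  refine Prod.ext ?_ ?_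
  · show pvDr (s + k) = 1 + PySem.Int.mod (s + k - 1) 9
    rw [pvDr, if_neg (by omega)]
  · show (((PySem.List.pyRange s (high + 1)).map pvDr).count (pvDr (s + k)) : Int) = _
    rw [pv_count_dr s (s + k) hs (by omega) high hhi,
        show (s + k - s) % 9 = k by omega, if_pos (by omega),
        PySem.Int.floordiv_eq_ediv_of_pos (by norm_num)]

-- ===== VERDICT (by name: the statement is the Claim_ definition above) =====
theorem distr_of_rec_digit_sums_spec : Claim_equal_distr_of_rec_digit_sums := by
  intro low high _ hpre
  unfold Spec_distr_of_rec_digit_sums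
  by_cases hgt : low > high
  · rw [distr_of_rec_digit_sums, distr_of_rec_digit_sums_alt, if_pos hgt,
        PySem.List.pyRange_one_eq_nil (by omega : high + 1 ≤ low)]
    rfl
  · have hle : low ≤ high := by omega
    have hlow0 : 0 ≤ low := hpre.resolve_right (by omega)
    rw [distr_of_rec_digit_sums, distr_of_rec_digit_sums_alt, if_neg hgt]
    simp only
    rw [pv_a_fold_eq_counter,
        List.map_congr_left (fun x hx => pv_reg_dig_sum_eq x (by
          rw [PySem.List.mem_pyRange_one] at hx; omega)),
        PySem.Dict.items_counter]
    by_cases h0 : low = 0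
    · subst h0
      simp only [reduceIte]
      rw [PySem.List.pyRange_one_cons (by omega : (0:Int) < high + 1),
          show (0:Int) + 1 = 1 from by norm_num, List.map_cons,
          show pvDr 0 = 0 from rfl]
      have hrest : ∀ y ∈ (PySem.List.pyRange 1 (high + 1)).map pvDr, y ≠ 0 := by
        intro y hy
        obtain ⟨x, hx, rfl⟩ := List.mem_map.mp hy
        rw [PySem.List.mem_pyRange_one] at hx
        have := pv_dr_pos x (by omega)
        omega
      rw [pv_ofList_cons_fresh 0 _ hrest, List.map_cons]
      set rest := List.map pvDr (PySem.List.pyRange 1 (high + 1)) with hrestdef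
      have htail : List.map (fun v => (v, (List.count v (0 :: rest) : Int))) (PySem.Set.ofList rest)
          = List.map (fun v => (v, (List.count v rest : Int))) (PySem.Set.ofList rest) :=
        List.map_congr_left (fun v hv => by
          have hv0 : v ≠ 0 := hrest v ((PySem.Set.mem_ofList _ v).mp hv)
          rw [List.count_cons, if_neg (by simpa using fun h => hv0 h.symm), Nat.add_zero])
      have hhead : ((List.count (0:Int) (0 :: rest) : Nat) : Int) = 1 := by
        rw [List.count_cons, List.count_eq_zero.mpr (fun hmem => hrest 0 hmem rfl)]
        norm_num
      rw [htail, hhead, hrestdef, pv_main_pos 1 high (le_refl 1) (by omega),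
          pv_alt_loop_items high 1 9 0 (PySem.Dict.empty.insert 0 1) (by norm_num) (by norm_num)
            (by
              intro k hk0 hk9
              rw [PySem.Dict.contains_insert, PySem.Dict.contains_empty, Bool.or_false]
              refine beq_eq_false_iff_ne.mpr ?_
              rw [PySem.Int.mod_eq_emod_of_pos (by norm_num)]
              have := Int.emod_nonneg (1 + k - 1) (by norm_num : (9:Int) ≠ 0)
              omega),
          show (PySem.Dict.empty.insert (0:Int) (1:Int)).items = [(0, 1)] from rfl]
      rfl
    · have hs1 : 1 ≤ low := by omega
      simp only [if_neg h0]
      rw [pv_alt_loop_items high low 9 0 PySem.Dict.empty (by norm_num) (by norm_num)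
            (fun k _ _ => PySem.Dict.contains_empty _),
          show (PySem.Dict.empty : PySem.Dict Int Int).items = [] from rfl,
          List.nil_append]
      exact pv_main_pos low high hs1 (by omega)
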